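-- pv_equiv track=rewrite | github.com/SaicharanRitwik39/Google-Foobar-Solutions | Extra Problems???/Disorderly-Escape.py | solution
-- ===== SOURCE A (Python) =====
-- from math import factorial
--
-- def count_occurrences(lst):
--     counts = {}
--     for num in lst:
--         if num in counts:
--             counts[num] += 1
--         else:
--             counts[num] = 1
--     return counts
--
-- def cycle_count(c, n):
--     cc = factorial(n)
--     for a, b in count_occurrences(c).items():
--         cc //= (a ** b) * factorial(b)
--     return cc
--
-- def cycle_partitions(n, i=1):
--     yield [n]
--     for i in range(i, n//2 + 1):
--         for p in cycle_partitions(n - i, i):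
--             yield [i] + p
--
-- def greatest_common_divisor(a, b):
--     while b:
--         a, b = b, a % b
--     return a
--
-- def solution(w, h, s):
--     grid_count = 0
--     for cpw in cycle_partitions(w):
--         for cph in cycle_partitions(h):
--             cpw_count = cycle_count(cpw, w)
--             cph_count = cycle_count(cph, h)
--             cpw_gcd_sum = sum([sum([greatest_common_divisor(i, j) for i in cpw]) for j in cph])
--             grid_count += cpw_count * cph_count * (s ** cpw_gcd_sum)
--
--     total_count = factorial(w) * factorial(h)
--     return str(grid_count // total_count)
-- ===== SOURCE B (Python) =====
-- from math import factorial
--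
--
-- def _partitions(n, lo=1):
--     acc = [[n]]
--     for i in range(lo, n // 2 + 1):
--         for tail in _partitions(n - i, i):
--             acc.append([i] + tail)
--     return acc
--
--
-- def _totients(m):
--     # phi[d] = d - sum of phi over proper divisors of d (from sum_{e|d} phi(e) = d)
--     phi = [0] * (m + 1)
--     for d in range(1, m + 1):
--         phi[d] = d - sum(phi[e] for e in range(1, d) if d % e == 0)
--     return phi
--
--
-- def _profile(p, n, m):
--     # weight n!/prod(a^b*b!) via a single run-counting product: the j-th occurrence
--     # (left to right) of value x contributes a factor x*j
--     den = 1
--     for i, x in enumerate(p):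
--         den *= x * p[: i + 1].count(x)
--     cnt = [0] * (m + 1)
--     for d in range(1, m + 1):
--         cnt[d] = sum(1 for x in p if x % d == 0)
--     return factorial(n) // den, cnt
--
--
-- def solution(w, h, s):
--     # Burnside count; sum_{i,j} gcd(i,j) = sum_d phi(d)*#{i: d|i}*#{j: d|j}
--     m = w if w < h else h
--     phi = _totients(m)
--     rows = [_profile(p, w, m) for p in _partitions(w)]
--     cols = [_profile(p, h, m) for p in _partitions(h)]
--     total = 0
--     for cw, vw in rows:
--         for ch, vh in cols:
--             e = sum(phi[d] * vw[d] * vh[d] for d in range(1, m + 1))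
--             total += cw * ch * s ** e
--     return str(total // (factorial(w) * factorial(h)))
-- ===== Notes on version B (the rewrite author's own statement) =====
-- stated objective: alternative
-- what changed: B eliminates A's per-pair gcd double loop and its Counter-based coefficient formula entirely: each partition is preprocessed once into a profile (class weight computed by a run-counting product over the list, and a divisor-multiplicity vector cnt[d] = number of parts divisible by d), a totient table is built from the recurrence phi(d) = d - sum of phi over proper divisors, and each Burnside exponent is computed as sum_d phi(d)*cnt_row[d]*cnt_col[d] via the identity gcd(i,j) = sum of phi over common divisors; no gcd is ever computed and no weight is recomputed inside the pair loop.
import Mathlib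
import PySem

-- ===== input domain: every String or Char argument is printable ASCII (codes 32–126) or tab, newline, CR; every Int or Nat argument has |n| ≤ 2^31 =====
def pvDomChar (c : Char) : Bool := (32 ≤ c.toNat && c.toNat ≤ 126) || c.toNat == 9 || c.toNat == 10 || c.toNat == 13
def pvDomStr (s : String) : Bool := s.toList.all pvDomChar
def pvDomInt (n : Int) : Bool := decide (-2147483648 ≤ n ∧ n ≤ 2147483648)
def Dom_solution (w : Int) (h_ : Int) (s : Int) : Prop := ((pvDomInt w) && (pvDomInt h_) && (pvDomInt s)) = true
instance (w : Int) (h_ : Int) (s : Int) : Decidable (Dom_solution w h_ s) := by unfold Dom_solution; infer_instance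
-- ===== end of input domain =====

-- B replaces A's per-pair gcd double loop and Counter/factorial coefficient formula by
-- per-partition profiles (run-counting weight, divisor-multiplicity vector) and a totient
-- table, computing each Burnside exponent as sum_d phi(d)*cnt_row[d]*cnt_col[d]
-- (objective: alternative — no gcd computed, nothing recomputed inside the pair loop).

-- ===== PORT A =====

-- math.factorial; Python raises ValueError on negative arguments — Pre_ keeps all arguments ≥ 0
def pyFactA (n : Int) : Int := (Nat.factorial n.toNat : Int)

def countOccurrencesA (lst : List Int) : PySem.Dict Int Int :=
  lst.foldl
    (fun counts num =>
      if counts.contains num then counts.insert num (counts.getD num 0 + 1)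
      else counts.insert num 1)
    PySem.Dict.empty

def cycleCountA (c : List Int) (n : Int) : Int :=
  (countOccurrencesA c).items.foldl
    (fun cc ab => PySem.Int.floordiv cc (ab.1 ^ ab.2.toNat * pyFactA ab.2))
    (pyFactA n)

-- cycle_partitions is a generator recursing on n - i; fuel (enough for every call from
-- `solution`, where the first argument only shrinks) makes the same recursion structural
def cyclePartitionsA : Nat → Int → Int → List (List Int)
  | 0, _, _ => []
  | fuel + 1, n, i =>
      [n] :: (PySem.List.pyRange i (PySem.Int.floordiv n 2 + 1)).flatMap
        (fun k => (cyclePartitionsA fuel (n - k) k).map (fun p => k :: p))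

def gcdA (a b : Int) : Int :=
  if _h : b = 0 then a else gcdA b (PySem.Int.mod a b)
termination_by b.natAbs
decreasing_by
  rcases lt_trichotomy b 0 with hb | hb | hb
  · have := PySem.Int.mod_neg_bounds a hb; omega
  · exact absurd hb _h
  · have h1 := PySem.Int.mod_nonneg a hb; have h2 := PySem.Int.mod_lt a hb; omega

def gcdSumA (cpw cph : List Int) : Int :=
  (cph.map (fun j => (cpw.map (fun i => gcdA i j)).sum)).sum

def solution (w : Int) (h_ : Int) (s : Int) : String :=
  let grid_count :=
    (cyclePartitionsA w.toNat w 1).foldl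
      (fun acc cpw =>
        (cyclePartitionsA h_.toNat h_ 1).foldl
          (fun acc2 cph =>
            acc2 + cycleCountA cpw w * cycleCountA cph h_ * s ^ (gcdSumA cpw cph).toNat)
          acc)
      0
  PySem.Int.toStr (PySem.Int.floordiv grid_count (pyFactA w * pyFactA h_))

-- ===== PORT B =====

def bFact (n : Int) : Int := (Nat.factorial n.toNat : Int)

-- _partitions builds an accumulator list; same fuel device (the recursion is on n - i)
def bPartitions : Nat → Int → Int → List (List Int)
  | 0, _, _ => []
  | fuel + 1, n, lo =>
      (PySem.List.pyRange lo (PySem.Int.floordiv n 2 + 1)).foldl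
        (fun acc i => acc ++ (bPartitions fuel (n - i) i).map (fun t => i :: t))
        [[n]]

-- _totients: phi[d] = d - sum(phi[e] for e in range(1, d) if d % e == 0);
-- phi[e] is read with getD: exact, since 1 ≤ e < d ≤ m keeps the index in range
def bTotients (m : Int) : List Int :=
  (PySem.List.pyRange 1 (m + 1)).foldl
    (fun phi d =>
      phi.set d.toNat
        (d - (PySem.List.pyRange 1 d).foldl
              (fun acc e => if PySem.Int.mod d e == 0 then acc + phi.getD e.toNat 0 else acc) 0))
    (List.replicate (m + 1).toNat 0)

def bProfile (p : List Int) (n m : Int) : Int × List Int :=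
  let den := (PySem.List.enumerate p).foldl
      (fun den ix => den * (ix.2 * ((PySem.List.slice p none (some (ix.1 + 1))).count ix.2 : Int))) 1
  let cnt := (PySem.List.pyRange 1 (m + 1)).foldl
      (fun cnt d => cnt.set d.toNat (p.foldl (fun a x => if PySem.Int.mod x d == 0 then a + 1 else a) 0))
      (List.replicate (m + 1).toNat 0)
  (PySem.Int.floordiv (bFact n) den, cnt)

-- phi[d], vw[d], vh[d] are read with getD: exact, since 1 ≤ d ≤ m keeps the index in range
def solution_alt (w : Int) (h_ : Int) (s : Int) : String :=
  let m := if w < h_ then w else h_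
  let phi := bTotients m
  let rows := (bPartitions w.toNat w 1).map (fun p => bProfile p w m)
  let cols := (bPartitions h_.toNat h_ 1).map (fun p => bProfile p h_ m)
  let total := rows.foldl
    (fun acc r =>
      cols.foldl
        (fun acc2 c =>
          acc2 + r.1 * c.1 * s ^ ((PySem.List.pyRange 1 (m + 1)).foldl
              (fun a d => a + phi.getD d.toNat 0 * r.2.getD d.toNat 0 * c.2.getD d.toNat 0) 0).toNat)
        acc)
    0
  PySem.Int.toStr (PySem.Int.floordiv total (bFact w * bFact h_))

-- ===== PRECONDITION & SPEC =====

-- Python A raises outside 1 ≤ w ∧ 1 ≤ h: for w = 0 or h = 0 cycle_count divides by 0**1 = 0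
-- (ZeroDivisionError), for negative w or h math.factorial raises ValueError.
def Pre_solution (w : Int) (h_ : Int) (s : Int) : Prop := 1 ≤ w ∧ 1 ≤ h_
instance (w : Int) (h_ : Int) (s : Int) : Decidable (Pre_solution w h_ s) := by
  unfold Pre_solution; infer_instance

def pvWitness_solution : Int × Int × Int := (2, 3, 2)

def Spec_solution (w : Int) (h_ : Int) (s : Int) (out : String) : Prop := out = solution_alt w h_ s
instance (w : Int) (h_ : Int) (s : Int) (out : String) : Decidable (Spec_solution w h_ s out) := by unfold Spec_solution; infer_instance

-- ===== CLAIM (what is proved, stated in full; the proofs are below) =====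
def Claim_equal_solution : Prop := ∀ (w : Int) (h_ : Int) (s : Int), Dom_solution w h_ s → Pre_solution w h_ s → Spec_solution w h_ s (solution w h_ s)

-- ===== LEMMAS AND PROOFS =====

-- B's partition recursion produces the same list as A's
theorem bParts_eq : ∀ (fuel : Nat) (n i : Int), bPartitions fuel n i = cyclePartitionsA fuel n i := by
  intro fuel
  induction fuel with
  | zero => intro n i; rfl
  | succ fuel ih =>
      intro n i
      simp [bPartitions, cyclePartitionsA, ih, List.flatMap_def]

-- every part of every emitted partition is ≥ 1
theorem parts_pos : ∀ (fuel : Nat) (n i : Int), 1 ≤ n → 1 ≤ i →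
    ∀ p ∈ cyclePartitionsA fuel n i, ∀ x ∈ p, 1 ≤ x := by
  intro fuel
  induction fuel with
  | zero => intro n i _ _ p hp; simp [cyclePartitionsA] at hp
  | succ fuel ih =>
      intro n i hn hi p hp x hx
      simp only [cyclePartitionsA, List.mem_cons, List.mem_flatMap, List.mem_map] at hp
      rcases hp with rfl | ⟨k, hk, q, hq, rfl⟩
      · simp at hx; omega
      · rw [PySem.List.mem_pyRange_one] at hk
        rw [PySem.Int.floordiv_eq_ediv_of_pos (by norm_num : (0:Int) < 2)] at hk
        have hk1 : 1 ≤ k := le_trans hi hk.1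
        have hn' : 1 ≤ n - k := by omega
        rcases List.mem_cons.mp hx with rfl | hxq
        · exact hk1
        · exact ih (n - k) k hn' hk1 q hq x hxq


-- every emitted partition sums to n
theorem parts_sum : ∀ (fuel : Nat) (n i : Int),
    ∀ p ∈ cyclePartitionsA fuel n i, p.sum = n := by
  intro fuel
  induction fuel with
  | zero => intro n i p hp; simp [cyclePartitionsA] at hp
  | succ fuel ih =>
      intro n i p hp
      simp only [cyclePartitionsA, List.mem_cons, List.mem_flatMap, List.mem_map] at hp
      rcases hp with rfl | ⟨k, hk, q, hq, rfl⟩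
      · simp
      · have := ih (n - k) k q hq
        simp [this]

-- ---------- weights: B's run-counting product equals A's Counter-based denominators ----------

def fc (k : Int) (c : Nat) : Int := k ^ c * (Nat.factorial c : Int)

theorem enum_append {α : Type} (l : List α) (x : α) : ∀ s : Int,
    PySem.List.enumerate (l ++ [x]) s = PySem.List.enumerate l s ++ [(s + l.length, x)] := by
  induction l with
  | nil => intro s; simp [PySem.List.enumerate]
  | cons a t ih =>
      intro s
      simp only [List.cons_append, PySem.List.enumerate, ih (s+1), List.length_cons]
      have : s + 1 + (t.length : Int) = s + ((t.length + 1 : Nat) : Int) := by push_cast; ring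
      rw [this]

theorem mem_enumerate_bounds {α : Type} (l : List α) : ∀ (s : Int), ∀ ix ∈ PySem.List.enumerate l s,
    s ≤ ix.1 ∧ ix.1 < s + l.length := by
  induction l with
  | nil => intro s ix h; simp [PySem.List.enumerate] at h
  | cons a t ih =>
      intro s ix h
      simp only [PySem.List.enumerate, List.mem_cons] at h
      rcases h with rfl | h
      · simp
      · have := ih (s+1) ix h
        simp only [List.length_cons]
        push_cast
        omega

theorem prod_fc_eq (p : List Int) : ∀ (x : Int),
    ((PySem.Set.ofList (p ++ [x])).map (fun k => fc k ((p ++ [x]).count k))).prod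
      = ((PySem.Set.ofList p).map (fun k => fc k (p.count k))).prod * (x * (p.count x + 1)) := by
  intro x
  by_cases hx : x ∈ p
  · have hofl : PySem.Set.ofList (p ++ [x]) = PySem.Set.ofList p := by
      rw [PySem.Set.ofList_append_singleton, PySem.Set.add_of_mem ((PySem.Set.mem_ofList p x).mpr hx)]
    have hxL : x ∈ PySem.Set.ofList p := (PySem.Set.mem_ofList p x).mpr hx
    have hnd := PySem.Set.nodup_ofList p
    have hperm := List.perm_cons_erase hxL
    have herase : ∀ (g : Int → Int), ((PySem.Set.ofList p).map g).prod
        = g x * (((PySem.Set.ofList p).erase x).map g).prod := by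
      intro g
      rw [(hperm.map g).prod_eq]; simp
    have hcong : ((PySem.Set.ofList p).erase x).map (fun k => fc k ((p ++ [x]).count k))
        = ((PySem.Set.ofList p).erase x).map (fun k => fc k (p.count k)) := by
      refine List.map_congr_left ?_
      intro k hk
      have hkx : k ≠ x := by
        rintro rfl; exact hnd.not_mem_erase hk
      rw [List.count_append, List.count_singleton, if_neg (by simpa using fun h => hkx (by simpa using h.symm))]
      simp
    rw [hofl, herase, herase, hcong]
    have hcx : (p ++ [x]).count x = p.count x + 1 := by
      rw [List.count_append, List.count_singleton]; simp
    rw [hcx]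
    have hfc : fc x (p.count x + 1) = fc x (p.count x) * (x * ((p.count x : Int) + 1)) := by
      simp [fc, pow_succ, Nat.factorial_succ]
      ring
    rw [hfc]; ring
  · have hofl : PySem.Set.ofList (p ++ [x]) = PySem.Set.ofList p ++ [x] := by
      rw [PySem.Set.ofList_append_singleton,
        PySem.Set.add_of_not_mem (fun h => hx ((PySem.Set.mem_ofList p x).mp h))]
    have hcnt0 : p.count x = 0 := List.count_eq_zero.mpr hx
    rw [hofl, List.map_append, List.prod_append]
    have hcong : (PySem.Set.ofList p).map (fun k => fc k ((p ++ [x]).count k))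
        = (PySem.Set.ofList p).map (fun k => fc k (p.count k)) := by
      refine List.map_congr_left ?_
      intro k hk
      have hkx : k ≠ x := fun h => hx (h ▸ (PySem.Set.mem_ofList p k).mp hk)
      rw [List.count_append, List.count_singleton, if_neg (by simpa using fun h => hkx (by simpa using h.symm))]
      simp
    rw [hcong]
    simp [fc, List.count_append, hcnt0]

theorem den_fold_eq (p : List Int) :
    (PySem.List.enumerate p 0).foldl
      (fun den ix => den * (ix.2 * ((PySem.List.slice p none (some (ix.1 + 1))).count ix.2 : Int))) 1
    = ((PySem.Set.ofList p).map (fun k => fc k (p.count k))).prod := by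
  induction p using List.reverseRecOn with
  | nil => simp [PySem.List.enumerate, PySem.Set.ofList]
  | append_singleton p x ih =>
      rw [enum_append, List.foldl_append, prod_fc_eq]
      simp only [List.foldl_cons, List.foldl_nil]
      have hinner :
          (PySem.List.enumerate p 0).foldl
            (fun den ix => den * (ix.2 * ((PySem.List.slice (p ++ [x]) none (some (ix.1 + 1))).count ix.2 : Int))) 1
          = (PySem.List.enumerate p 0).foldl
            (fun den ix => den * (ix.2 * ((PySem.List.slice p none (some (ix.1 + 1))).count ix.2 : Int))) 1 := by
        refine PySem.List.foldl_congr_mem _ _ _ _ ?_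
        intro acc ix hix
        have hb := mem_enumerate_bounds p 0 ix hix
        have h0 : (0:Int) ≤ ix.1 + 1 := by omega
        rw [PySem.List.slice_to (p ++ [x]) h0]
        rw [PySem.List.slice_to p h0]
        rw [List.take_append_of_le_length (by omega : (ix.1 + 1).toNat ≤ p.length)]
      rw [hinner, ih]
      have hlast : PySem.List.slice (p ++ [x]) none (some ((0 + (p.length : Int)) + 1)) = p ++ [x] := by
        rw [PySem.List.slice_to (p ++ [x]) (by omega)]
        rw [List.take_of_length_le (by simp)]
      rw [hlast]
      have : ((p ++ [x]).count x : Int) = (p.count x : Int) + 1 := by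
        rw [List.count_append, List.count_singleton]; simp
      rw [this]

-- A's count_occurrences is Counter
theorem countOccA_eq (l : List Int) : countOccurrencesA l = PySem.Dict.counter l := by
  unfold countOccurrencesA
  rw [show (fun (counts : PySem.Dict Int Int) num =>
        if counts.contains num then counts.insert num (counts.getD num 0 + 1)
        else counts.insert num 1)
      = (fun (d : PySem.Dict Int Int) x => d.insert x (d.getD x 0 + 1)) from ?_ ,
      PySem.Dict.foldl_insert_getD_add_one_eq_counter]
  funext d x
  by_cases hc : d.contains x
  · simp [hc]
  · simp only [hc, Bool.false_eq_true, if_false]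
    rw [PySem.Dict.getD_of_not_contains d 0 (by simpa using hc)]
    norm_num

-- sequential floor division by positive factors = one floor division by their product
theorem seq_div (g : Int × Int → Int) :
    ∀ (l : List (Int × Int)) (X : Int), (∀ ab ∈ l, 0 < g ab) →
    l.foldl (fun cc ab => PySem.Int.floordiv cc (g ab)) X
      = PySem.Int.floordiv X ((l.map g).prod) := by
  intro l
  induction l with
  | nil => intro X _; simp
  | cons ab t ih =>
      intro X hpos
      have hab : 0 < g ab := hpos ab List.mem_cons_self
      have ht : ∀ p ∈ t, 0 < g p := fun p hp => hpos p (List.mem_cons_of_mem ab hp)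
      have hprod : 0 < (t.map g).prod :=
        List.prod_pos (by intro a ha; rcases List.mem_map.mp ha with ⟨p, hp, rfl⟩; exact ht p hp)
      simp only [List.foldl_cons, List.map_cons, List.prod_cons]
      rw [ih (PySem.Int.floordiv X (g ab)) ht]
      rw [PySem.Int.floordiv_eq_ediv_of_pos hab, PySem.Int.floordiv_eq_ediv_of_pos hprod,
        PySem.Int.floordiv_eq_ediv_of_pos (mul_pos hab hprod),
        Int.ediv_ediv_of_nonneg (le_of_lt hab)]

-- positivity of each denominator factor
theorem factor_pos (c : List Int) (hc : ∀ x ∈ c, 1 ≤ x) :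
    ∀ ab ∈ (PySem.Dict.counter c).items, 0 < ab.1 ^ ab.2.toNat * pyFactA ab.2 := by
  intro ab hab
  rw [PySem.Dict.items_counter] at hab
  rcases List.mem_map.mp hab with ⟨k, hk, rfl⟩
  have hk1 : 1 ≤ k := hc k ((PySem.Set.mem_ofList c k).mp hk)
  have h1 : (0:Int) < k ^ (((c.count k : Int)).toNat) := pow_pos (by omega) _
  have h2 : (0:Int) < pyFactA (c.count k : Int) := by
    unfold pyFactA; exact_mod_cast Nat.factorial_pos _
  exact mul_pos h1 h2

-- A's Counter-items factors, as the fc-product over the distinct parts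
theorem items_prod_eq_fc (c : List Int) :
    ((PySem.Dict.counter c).items.map (fun ab => ab.1 ^ ab.2.toNat * pyFactA ab.2)).prod
      = ((PySem.Set.ofList c).map (fun k => fc k (c.count k))).prod := by
  rw [PySem.Dict.items_counter, List.map_map]
  refine congrArg (List.prod) (List.map_congr_left ?_)
  intro k _
  simp [fc, pyFactA]

-- A's incremental cycle_count equals B's run-counting weight
theorem weight_eq (c : List Int) (hc : ∀ x ∈ c, 1 ≤ x) (n m : Int) :
    (bProfile c n m).1 = cycleCountA c n := by
  unfold cycleCountA
  rw [countOccA_eq]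
  rw [seq_div (fun ab => ab.1 ^ ab.2.toNat * pyFactA ab.2) _ _ (factor_pos c hc)]
  simp only [bProfile]
  rw [den_fold_eq, ← items_prod_eq_fc]
  rfl

-- ---------- the totient table and divisor-count vectors ----------

theorem pyRange_one_natCast : ∀ (n : Nat), PySem.List.pyRange 1 ((n:Int) + 1) = (List.range' 1 n).map (fun e : Nat => (e : Int)) := by
  intro n
  induction n with
  | zero => rfl
  | succ n ih =>
      have h1 : ((n+1:Nat):Int) + 1 = ((n:Int) + 1) + 1 := by push_cast; ring
      rw [h1, PySem.List.pyRange_one_succ_right (by omega), ih, List.range'_concat]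
      simp; omega

-- the partial totient table after processing 1..n
theorem tot_inv (m : Int) (hm : 0 ≤ m) : ∀ (n : Nat), (n : Int) ≤ m →
    (((PySem.List.pyRange 1 ((n:Int) + 1)).foldl
      (fun phi d =>
        phi.set d.toNat
          (d - (PySem.List.pyRange 1 d).foldl
                (fun acc e => if PySem.Int.mod d e == 0 then acc + phi.getD e.toNat 0 else acc) 0))
      (List.replicate (m + 1).toNat 0)).length = (m + 1).toNat)
    ∧ ∀ k : Nat,
      ((PySem.List.pyRange 1 ((n:Int) + 1)).foldl
        (fun phi d =>
          phi.set d.toNat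
            (d - (PySem.List.pyRange 1 d).foldl
                  (fun acc e => if PySem.Int.mod d e == 0 then acc + phi.getD e.toNat 0 else acc) 0))
        (List.replicate (m + 1).toNat 0)).getD k 0
      = if 1 ≤ k ∧ k ≤ n then (Nat.totient k : Int) else 0 := by
  intro n
  induction n with
  | zero =>
      intro _
      constructor
      · simp
      · intro k
        rw [if_neg (by omega)]
        rw [List.getD_eq_getElem?_getD]
        rcases lt_or_ge k (m+1).toNat with h | h
        · simp [h]
        · rw [List.getElem?_eq_none (by simpa using h)]
          rfl
  | succ n ih =>
      intro hn1
      obtain ⟨hlen, hget⟩ := ih (by omega)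
      have hstep : ((n+1:Nat):Int) + 1 = ((n:Int) + 1) + 1 := by push_cast; ring
      rw [hstep, PySem.List.pyRange_one_succ_right (by omega), List.foldl_append]
      set L := (PySem.List.pyRange 1 ((n:Int) + 1)).foldl
        (fun phi d =>
          phi.set d.toNat
            (d - (PySem.List.pyRange 1 d).foldl
                  (fun acc e => if PySem.Int.mod d e == 0 then acc + phi.getD e.toNat 0 else acc) 0))
        (List.replicate (m + 1).toNat 0) with hL
      simp only [List.foldl_cons, List.foldl_nil]
      -- the inner sum over 1..n equals the totient sum over proper divisors of n+1
      have hsum : (PySem.List.pyRange 1 ((n:Int)+1)).foldl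
          (fun acc e => if PySem.Int.mod ((n:Int)+1) e == 0 then acc + L.getD e.toNat 0 else acc) 0
          = (((n+1 : Nat) : Int)) - (Nat.totient (n+1) : Int) := by
        rw [PySem.List.foldl_if_eq_foldl_filter, PySem.List.foldl_add]
        rw [pyRange_one_natCast, List.filter_map, List.map_map]
        simp only [Function.comp_def]
        have hcong : ∀ e ∈ (List.range' 1 n).filter (fun e : Nat => PySem.Int.mod ((n:Int)+1) (e:Int) == 0),
            L.getD ((e : Int)).toNat 0 = (Nat.totient e : Int) := by
          intro e he
          rw [List.mem_filter] at he
          have hmem := List.mem_range'_1.mp he.1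
          rw [Int.toNat_natCast, hget e, if_pos (by omega)]
        rw [List.map_congr_left hcong]
        have hfc : (List.range' 1 n).filter (fun e : Nat => PySem.Int.mod ((n:Int)+1) (e:Int) == 0)
            = (List.range' 1 n).filter (fun e : Nat => decide (e ∣ (n+1))) := by
          refine List.filter_congr ?_
          intro e he
          rw [Bool.eq_iff_iff]
          simp only [beq_iff_eq, decide_eq_true_eq, PySem.Int.mod_eq_zero_iff_dvd]
          constructor
          · intro hd; exact_mod_cast hd
          · intro hd; exact_mod_cast (Int.natCast_dvd_natCast.mpr hd)
        rw [hfc]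
        rw [← List.sum_toFinset (fun e : Nat => (Nat.totient e : Int)) (((List.nodup_range' (s := 1) (n := n) 1)).filter _)]
        have htf : ((List.range' 1 n).filter (fun e : Nat => decide (e ∣ (n+1)))).toFinset = (n+1).properDivisors := by
          ext e
          simp only [List.mem_toFinset, List.mem_filter, List.mem_range'_1, decide_eq_true_eq,
            Nat.mem_properDivisors]
          constructor
          · rintro ⟨⟨h1, h2⟩, hd⟩; exact ⟨hd, by omega⟩
          · rintro ⟨hd, hlt⟩
            have := Nat.pos_of_dvd_of_pos hd (by omega)
            exact ⟨⟨by omega, by omega⟩, hd⟩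
        rw [htf, ← Nat.cast_sum]
        have hins := Nat.insert_self_properDivisors (n := n+1) (by omega)
        have hni : (n+1) ∉ (n+1).properDivisors := by
          intro hmem
          have := (Nat.mem_properDivisors.mp hmem).2
          omega
        have hsum2 : Nat.totient (n+1) + ∑ e ∈ (n+1).properDivisors, Nat.totient e = n+1 := by
          have := Nat.sum_totient (n+1)
          rw [← hins, Finset.sum_insert hni] at this
          exact this
        have hle : (∑ e ∈ (n+1).properDivisors, Nat.totient e) = (n+1) - Nat.totient (n+1) := by omega
        rw [hle]
        push_cast [Nat.totient_le]
        omega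
      constructor
      · rw [List.length_set, hlen]
      · intro k
        have hval : ((n:Int)+1) - ((((n+1 : Nat) : Int)) - (Nat.totient (n+1) : Int)) = (Nat.totient (n+1) : Int) := by
          push_cast; ring
        rw [hsum, hval]
        rw [List.getD_eq_getElem?_getD, List.getElem?_set]
        have htn : ((n:Int)+1).toNat = n+1 := by omega
        rw [htn]
        by_cases hk : n+1 = k
        · subst hk
          rw [if_pos rfl, if_pos (show n+1 < L.length by rw [hlen]; omega),
            if_pos (show 1 ≤ n+1 ∧ n+1 ≤ n+1 by omega)]
          rfl
        · rw [if_neg hk, ← List.getD_eq_getElem?_getD, hget k]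
          by_cases h1 : 1 ≤ k ∧ k ≤ n
          · rw [if_pos h1, if_pos (by omega)]
          · rw [if_neg h1, if_neg (by omega)]

-- tabulation fold whose stored value ignores the accumulator (B's cnt vectors)
theorem setfold_inv (g : Int → Int) (m : Int) (hm : 0 ≤ m) : ∀ (n : Nat), (n : Int) ≤ m →
    (((PySem.List.pyRange 1 ((n:Int) + 1)).foldl
      (fun l d => l.set d.toNat (g d)) (List.replicate (m + 1).toNat 0)).length = (m + 1).toNat)
    ∧ ∀ k : Nat,
      ((PySem.List.pyRange 1 ((n:Int) + 1)).foldl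
        (fun l d => l.set d.toNat (g d)) (List.replicate (m + 1).toNat 0)).getD k 0
      = if 1 ≤ k ∧ k ≤ n then g (k : Int) else 0 := by
  intro n
  induction n with
  | zero =>
      intro _
      constructor
      · simp
      · intro k
        rw [if_neg (by omega)]
        rw [List.getD_eq_getElem?_getD]
        rcases lt_or_ge k (m+1).toNat with h | h
        · simp [h]
        · rw [List.getElem?_eq_none (by simpa using h)]
          rfl
  | succ n ih =>
      intro hn1
      obtain ⟨hlen, hget⟩ := ih (by omega)
      have hstep : ((n+1:Nat):Int) + 1 = ((n:Int) + 1) + 1 := by push_cast; ring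
      rw [hstep, PySem.List.pyRange_one_succ_right (by omega), List.foldl_append]
      simp only [List.foldl_cons, List.foldl_nil]
      constructor
      · rw [List.length_set, hlen]
      · intro k
        rw [List.getD_eq_getElem?_getD, List.getElem?_set]
        have htn : ((n:Int)+1).toNat = n+1 := by omega
        rw [htn]
        by_cases hk : n+1 = k
        · subst hk
          rw [if_pos rfl, if_pos (by rw [hlen]; omega),
            if_pos (show 1 ≤ n+1 ∧ n+1 ≤ n+1 by omega)]
          simp
        · rw [if_neg hk, ← List.getD_eq_getElem?_getD, hget k]
          by_cases h1 : 1 ≤ k ∧ k ≤ n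
          · rw [if_pos h1, if_pos (by omega)]
          · rw [if_neg h1, if_neg (by omega)]

-- ---------- the gcd/totient identity ----------

theorem gcdA_natCast : ∀ (k m : Nat), gcdA (m : Int) (k : Int) = (Nat.gcd m k : Int) := by
  intro k
  induction k using Nat.strong_induction_on with
  | _ k ih =>
      intro m
      by_cases hk : k = 0
      · subst hk; rw [gcdA]; simp
      · rw [gcdA]
        rw [dif_neg (by exact_mod_cast hk)]
        rw [PySem.Int.mod_natCast]
        rw [ih (m % k) (Nat.mod_lt m (Nat.pos_of_ne_zero hk))]
        rw [Nat.gcd_comm k (m % k), ← Nat.gcd_rec k m, Nat.gcd_comm k m]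

-- gcd(i, j) as a totient sum over the common divisors in 1..m
theorem gcd_expand (m : Int) (i j : Int) (hi : 1 ≤ i) (hj : 1 ≤ j)
    (him : (Int.gcd i j : Int) ≤ m) :
    gcdA i j = ((PySem.List.pyRange 1 (m + 1)).map
      (fun d => (Nat.totient d.toNat : Int) *
        ((if PySem.Int.mod i d == 0 then (1:Int) else 0) * (if PySem.Int.mod j d == 0 then (1:Int) else 0)))).sum := by
  have hm0 : 0 ≤ m := le_trans (by positivity) him
  set g : Nat := Int.gcd i j with hg
  have hg1 : 1 ≤ g := by
    have : i ≠ 0 := by omega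
    have := Int.gcd_pos_of_ne_zero_left j this
    omega
  have hL : gcdA i j = (g : Int) := by
    have h1 : i = ((i.toNat : Nat) : Int) := by omega
    have h2 : j = ((j.toNat : Nat) : Int) := by omega
    rw [h1, h2, gcdA_natCast]
    congr 1
    rw [hg, h1, h2, Int.gcd_natCast_natCast]
    congr 1
  rw [hL]
  have hm' : m = ((m.toNat : Nat) : Int) := by omega
  rw [hm', pyRange_one_natCast, List.map_map]
  have hterm : ∀ e ∈ List.range' 1 m.toNat,
      ((fun d => (Nat.totient d.toNat : Int) *
        ((if PySem.Int.mod i d == 0 then (1:Int) else 0) * (if PySem.Int.mod j d == 0 then (1:Int) else 0))) ∘ (fun e : Nat => (e : Int))) e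
      = if e ∈ g.divisors then (Nat.totient e : Int) else 0 := by
    intro e he
    simp only [Function.comp_apply, Int.toNat_natCast]
    have hdvd : ∀ a : Int, (PySem.Int.mod a (e : Int) == 0) = decide ((e:Int) ∣ a) := by
      intro a
      rw [Bool.eq_iff_iff]
      simp [PySem.Int.mod_eq_zero_iff_dvd]
    rw [hdvd i, hdvd j]
    have : e ∈ g.divisors ↔ ((e:Int) ∣ i ∧ (e:Int) ∣ j) := by
      rw [Nat.mem_divisors]
      constructor
      · rintro ⟨hd, _⟩
        have h1 : (e:Int) ∣ (g:Int) := by exact_mod_cast hd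
        exact ⟨h1.trans (Int.gcd_dvd_left i j), h1.trans (Int.gcd_dvd_right i j)⟩
      · rintro ⟨h1, h2⟩
        refine ⟨?_, by omega⟩
        have := Int.dvd_gcd h1 h2
        exact_mod_cast this
    by_cases hc : e ∈ g.divisors
    · rw [if_pos hc]
      rcases this.mp hc with ⟨d1, d2⟩
      simp [d1, d2]
    · rw [if_neg hc]
      rcases not_and_or.mp (fun hcc => hc (this.mpr hcc)) with hno | hno <;> simp [hno]
  rw [List.map_congr_left hterm]
  have hnd : (List.range' 1 m.toNat).Nodup := List.nodup_range' 1
  rw [← List.sum_toFinset (fun e : Nat => if e ∈ g.divisors then (Nat.totient e : Int) else 0) hnd]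
  have htf : (List.range' 1 m.toNat).toFinset = Finset.Ico 1 (m.toNat + 1) := by
    ext e
    simp [List.mem_range'_1, Finset.mem_Ico]
    omega
  rw [htf, Finset.sum_ite_mem]
  have hflt : Finset.Ico 1 (m.toNat + 1) ∩ g.divisors = g.divisors := by
    rw [Finset.inter_eq_right]
    intro e he
    rw [Nat.mem_divisors] at he
    rcases he with ⟨hd, hne⟩
    rw [Finset.mem_Ico]
    have h1 := Nat.pos_of_dvd_of_pos hd (by omega)
    have h2 := Nat.le_of_dvd (by omega) hd
    omega
  rw [hflt]
  rw [← Nat.cast_sum]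
  rw [Nat.sum_totient]

-- ---------- sum bookkeeping ----------

-- swap two nested list sums
theorem sum_sum_comm {α β : Type} (l1 : List α) (l2 : List β) (F : α → β → Int) :
    (l1.map (fun x => (l2.map (fun y => F x y)).sum)).sum
      = (l2.map (fun y => (l1.map (fun x => F x y)).sum)).sum := by
  induction l1 with
  | nil => simp
  | cons a t ih =>
      simp only [List.map_cons, List.sum_cons, ih, ← PySem.List.sum_map_add_int]

-- a grid double-fold as a double sum
theorem grid_as_sum {α β : Type} (P : List α) (Q : List β) (term : α → β → Int) :
    P.foldl (fun acc p => Q.foldl (fun acc2 q => acc2 + term p q) acc) 0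
      = (P.map (fun p => (Q.map (fun q => term p q)).sum)).sum := by
  have h : (fun (acc : Int) p => Q.foldl (fun acc2 q => acc2 + term p q) acc)
      = (fun acc p => acc + (Q.map (fun q => term p q)).sum) := by
    funext acc p; exact PySem.List.foldl_add Q (fun q => term p q) acc
  rw [h, PySem.List.foldl_add P (fun p => (Q.map (fun q => term p q)).sum) 0, zero_add]

-- B's exponent fold equals A's gcd double sum
theorem tot_getD (m : Int) (hm : 0 ≤ m) (d : Int) (hd : 1 ≤ d ∧ d ≤ m) :
    (bTotients m).getD d.toNat 0 = (Nat.totient d.toNat : Int) := by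
  unfold bTotients
  rw [show m + 1 = ((m.toNat : Nat) : Int) + 1 by omega]
  have h := (tot_inv ((m.toNat : Nat) : Int) (by omega) m.toNat (by omega)).2 d.toNat
  rw [h, if_pos (by omega)]

theorem cnt_getD (p : List Int) (n m : Int) (hm : 0 ≤ m) (d : Int) (hd : 1 ≤ d ∧ d ≤ m) :
    (bProfile p n m).2.getD d.toNat 0
      = (p.map (fun x => if PySem.Int.mod x d == 0 then (1:Int) else 0)).sum := by
  simp only [bProfile]
  rw [show m + 1 = ((m.toNat : Nat) : Int) + 1 by omega]
  have h := (setfold_inv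
      (fun d => p.foldl (fun a x => if PySem.Int.mod x d == 0 then a + 1 else a) 0)
      ((m.toNat : Nat) : Int) (by omega) m.toNat (by omega)).2 d.toNat
  rw [h, if_pos (by omega)]
  rw [show ((d.toNat : Nat) : Int) = d by omega]
  rw [PySem.List.foldl_if_add_one, zero_add, ← PySem.List.sum_map_ite_one_zero]

theorem exp_eq (m wv hv : Int) (hm : 0 ≤ m) (cpw cph : List Int)
    (hw1 : ∀ i ∈ cpw, 1 ≤ i) (hh1 : ∀ j ∈ cph, 1 ≤ j)
    (hgc : ∀ i ∈ cpw, ∀ j ∈ cph, (Int.gcd i j : Int) ≤ m) :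
    (PySem.List.pyRange 1 (m + 1)).foldl
      (fun a d => a + (bTotients m).getD d.toNat 0
        * (bProfile cpw wv m).2.getD d.toNat 0 * (bProfile cph hv m).2.getD d.toNat 0) 0
      = gcdSumA cpw cph := by
  have hR : ∀ d ∈ PySem.List.pyRange 1 (m + 1), 1 ≤ d ∧ d ≤ m := by
    intro d hd; rw [PySem.List.mem_pyRange_one] at hd; omega
  -- left side: the fold as a sum of totient*count*count terms
  rw [PySem.List.foldl_add, zero_add]
  have hL : ∀ d ∈ PySem.List.pyRange 1 (m + 1),
      (bTotients m).getD d.toNat 0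
        * (bProfile cpw wv m).2.getD d.toNat 0 * (bProfile cph hv m).2.getD d.toNat 0
      = (Nat.totient d.toNat : Int)
        * ((cpw.map (fun i => if PySem.Int.mod i d == 0 then (1:Int) else 0)).sum
          * (cph.map (fun j => if PySem.Int.mod j d == 0 then (1:Int) else 0)).sum) := by
    intro d hd
    rw [tot_getD m hm d (hR d hd), cnt_getD cpw wv m hm d (hR d hd), cnt_getD cph hv m hm d (hR d hd)]
    ring
  rw [List.map_congr_left hL]
  -- right side: expand each gcd with the totient identity, then swap sums
  unfold gcdSumA
  have e1 : ∀ j ∈ cph, (cpw.map (fun i => gcdA i j)).sum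
      = ((PySem.List.pyRange 1 (m + 1)).map (fun d =>
          (cpw.map (fun i => (Nat.totient d.toNat : Int) *
            ((if PySem.Int.mod i d == 0 then (1:Int) else 0)
              * (if PySem.Int.mod j d == 0 then (1:Int) else 0)))).sum)).sum := by
    intro j hj
    have hterm : ∀ i ∈ cpw, gcdA i j
        = ((PySem.List.pyRange 1 (m + 1)).map
            (fun d => (Nat.totient d.toNat : Int) *
              ((if PySem.Int.mod i d == 0 then (1:Int) else 0)
                * (if PySem.Int.mod j d == 0 then (1:Int) else 0)))).sum := by
      intro i hi
      exact gcd_expand m i j (hw1 i hi) (hh1 j hj) (hgc i hi j hj)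
    rw [List.map_congr_left hterm]
    exact sum_sum_comm cpw (PySem.List.pyRange 1 (m + 1)) _
  rw [List.map_congr_left e1]
  rw [sum_sum_comm cph (PySem.List.pyRange 1 (m + 1)) _]
  refine congrArg List.sum (List.map_congr_left ?_)
  intro d hd
  -- fixed d: factor the two indicator sums
  have e2 : ∀ j ∈ cph,
      (cpw.map (fun i => (Nat.totient d.toNat : Int) *
        ((if PySem.Int.mod i d == 0 then (1:Int) else 0)
          * (if PySem.Int.mod j d == 0 then (1:Int) else 0)))).sum
      = ((Nat.totient d.toNat : Int) * (if PySem.Int.mod j d == 0 then (1:Int) else 0))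
          * (cpw.map (fun i => if PySem.Int.mod i d == 0 then (1:Int) else 0)).sum := by
    intro j hj
    rw [show cpw.map (fun i => (Nat.totient d.toNat : Int) *
          ((if PySem.Int.mod i d == 0 then (1:Int) else 0)
            * (if PySem.Int.mod j d == 0 then (1:Int) else 0)))
        = cpw.map (fun i => ((Nat.totient d.toNat : Int)
            * (if PySem.Int.mod j d == 0 then (1:Int) else 0))
            * (if PySem.Int.mod i d == 0 then (1:Int) else 0)) from
      List.map_congr_left (by intro i _; ring)]
    rw [List.sum_map_mul_left]
  rw [List.map_congr_left e2]
  rw [show cph.map (fun j => ((Nat.totient d.toNat : Int) * (if PySem.Int.mod j d == 0 then (1:Int) else 0))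
        * (cpw.map (fun i => if PySem.Int.mod i d == 0 then (1:Int) else 0)).sum)
      = cph.map (fun j => ((Nat.totient d.toNat : Int)
          * (cpw.map (fun i => if PySem.Int.mod i d == 0 then (1:Int) else 0)).sum)
          * (if PySem.Int.mod j d == 0 then (1:Int) else 0)) from
    List.map_congr_left (by intro j _; ring)]
  rw [List.sum_map_mul_left]
  ring


-- ===== VERDICT (by name: the statement is the Claim_ definition above) =====
theorem solution_spec : Claim_equal_solution := by
  intro w h_ s _ hpre
  obtain ⟨hw0, hh0⟩ := hpre
  unfold Spec_solution
  simp only [solution, solution_alt]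
  rw [show bFact = pyFactA from rfl, bParts_eq, bParts_eq]
  set m : Int := if w < h_ then w else h_ with hmdef
  have hm1 : 1 ≤ m := by rw [hmdef]; split_ifs <;> omega
  have hmw : m ≤ w := by rw [hmdef]; split_ifs <;> omega
  have hmh : m ≤ h_ := by rw [hmdef]; split_ifs <;> omega
  have hboundW : ∀ p ∈ cyclePartitionsA w.toNat w 1, ∀ x ∈ p, 1 ≤ x ∧ x ≤ w := by
    intro p hp x hx
    have hpos := parts_pos w.toNat w 1 hw0 (le_refl 1) p hp
    refine ⟨hpos x hx, ?_⟩
    have hsum := parts_sum w.toNat w 1 p hp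
    have := List.single_le_sum (l := p) (fun y hy => le_trans (by norm_num) (hpos y hy)) x hx
    omega
  have hboundH : ∀ p ∈ cyclePartitionsA h_.toNat h_ 1, ∀ x ∈ p, 1 ≤ x ∧ x ≤ h_ := by
    intro p hp x hx
    have hpos := parts_pos h_.toNat h_ 1 hh0 (le_refl 1) p hp
    refine ⟨hpos x hx, ?_⟩
    have hsum := parts_sum h_.toNat h_ 1 p hp
    have := List.single_le_sum (l := p) (fun y hy => le_trans (by norm_num) (hpos y hy)) x hx
    omega
  congr 2
  have hA := grid_as_sum (cyclePartitionsA w.toNat w 1) (cyclePartitionsA h_.toNat h_ 1)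
      (fun (cpw cph : List Int) =>
        cycleCountA cpw w * cycleCountA cph h_ * s ^ (gcdSumA cpw cph).toNat)
  have hB := grid_as_sum
      ((cyclePartitionsA w.toNat w 1).map (fun p => bProfile p w m))
      ((cyclePartitionsA h_.toNat h_ 1).map (fun p => bProfile p h_ m))
      (fun r c => r.1 * c.1 * s ^ ((PySem.List.pyRange 1 (m + 1)).foldl
          (fun a d => a + (bTotients m).getD d.toNat 0
            * r.2.getD d.toNat 0 * c.2.getD d.toNat 0) 0).toNat)
  rw [hA, hB]
  simp only [List.map_map, Function.comp_def]
  refine congrArg List.sum (List.map_congr_left ?_)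
  intro cpw hw
  refine congrArg List.sum (List.map_congr_left ?_)
  intro cph hh
  have hw1 : ∀ i ∈ cpw, 1 ≤ i := fun i hi => (hboundW cpw hw i hi).1
  have hh1 : ∀ j ∈ cph, 1 ≤ j := fun j hj => (hboundH cph hh j hj).1
  have hgc : ∀ i ∈ cpw, ∀ j ∈ cph, (Int.gcd i j : Int) ≤ m := by
    intro i hi j hj
    have hiw := hboundW cpw hw i hi
    have hjh := hboundH cph hh j hj
    have hd1 : ((Int.gcd i j : Nat) : Int) ∣ i := Int.gcd_dvd_left i j
    have hd2 : ((Int.gcd i j : Nat) : Int) ∣ j := Int.gcd_dvd_right i j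
    have hle1 : ((Int.gcd i j : Nat) : Int) ≤ i := Int.le_of_dvd (by omega) hd1
    have hle2 : ((Int.gcd i j : Nat) : Int) ≤ j := Int.le_of_dvd (by omega) hd2
    rw [hmdef]; split_ifs <;> omega
  rw [weight_eq cpw hw1 w m, weight_eq cph hh1 h_ m,
    exp_eq m w h_ (by omega) cpw cph hw1 hh1 hgc]
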